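-- pv_equiv track=rewrite | github.com/w00fx/recontagem-eleicoes-2022 | processamento.py | processar_votos
-- ===== SOURCE A (Python) =====
-- from collections import defaultdict
--
-- def processar_votos(votos):
--     votos_totalizados = defaultdict(int)
--     total_votos = 0
--
--     for voto in votos.get('votos'):
--         tipo_voto = voto.get('tipoVoto')
--         if tipo_voto == 'nominal':
--             votos_totalizados[voto.get('digitacao')] += 1
--             total_votos += 1
--         elif tipo_voto == 'branco':
--             votos_totalizados['branco'] += 1
--             total_votos += 1
--         elif tipo_voto == 'nulo':
--             votos_totalizados['nulo'] += 1
--             total_votos += 1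
--
--     return dict(votos_totalizados), total_votos
-- ===== SOURCE B (Python) =====
-- def _chaves(voto):
--     tipo = voto.get('tipoVoto')
--     if tipo == 'nominal':
--         return [voto.get('digitacao')]
--     if tipo in ('branco', 'nulo'):
--         return [tipo]
--     return []
--
--
-- def processar_votos(votos):
--     chaves = [c for voto in votos.get('votos') for c in _chaves(voto)]
--     return {c: chaves.count(c) for c in dict.fromkeys(chaves)}, len(chaves)
-- ===== Notes on version B (the rewrite author's own statement) =====
-- stated objective: alternative
-- what changed: B maintains no tally or total during iteration: it first extracts the flat list of keys (one comprehension over a small helper), then builds the result dict by counting each first-occurrence-distinct key with list.count, and the total is simply len() of the key list.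
-- outside the precondition, e.g. on processar_votos({'votos': [{'tipoVoto': 'nominal'}]}): A returns ({None: 1}, 1), B returns ({None: 1}, 1); on processar_votos({}): A raises TypeError, B raises TypeError
import Mathlib
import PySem

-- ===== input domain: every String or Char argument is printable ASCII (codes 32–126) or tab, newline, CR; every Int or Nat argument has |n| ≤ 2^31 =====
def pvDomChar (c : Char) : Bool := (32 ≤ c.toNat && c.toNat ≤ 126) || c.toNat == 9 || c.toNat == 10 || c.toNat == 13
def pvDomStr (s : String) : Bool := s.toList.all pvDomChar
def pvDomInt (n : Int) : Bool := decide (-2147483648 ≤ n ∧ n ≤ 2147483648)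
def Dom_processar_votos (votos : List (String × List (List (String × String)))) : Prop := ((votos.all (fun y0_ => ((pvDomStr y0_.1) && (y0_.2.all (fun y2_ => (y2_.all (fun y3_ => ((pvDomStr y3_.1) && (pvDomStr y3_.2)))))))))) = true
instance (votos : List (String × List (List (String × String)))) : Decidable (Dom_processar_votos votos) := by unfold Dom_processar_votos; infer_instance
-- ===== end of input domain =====

-- B keeps no tally at all during the loop: it extracts the key list, then builds the
-- result dict by counting each distinct key with list.count and takes len() as the total.

-- ===== PORT A =====
-- Literal port of A: one fold carrying (defaultdict tally, running total).
-- Under Pre_ every nominal vote has a 'digitacao' key, so 'getD "digitacao" ""' is voto.get('digitacao').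
def processar_votos (votos : List (String × List (List (String × String)))) : (List (String × Int)) × Int :=
  let st := ((PySem.Dict.ofList votos).getD "votos" []).foldl
    (fun (st : PySem.Dict String Int × Int) voto =>
      let v := PySem.Dict.ofList voto
      let tipo := v.get? "tipoVoto"
      if tipo = some "nominal" then
        (st.1.modify (v.getD "digitacao" "") 0 (· + 1), st.2 + 1)
      else if tipo = some "branco" then
        (st.1.modify "branco" 0 (· + 1), st.2 + 1)
      else if tipo = some "nulo" then
        (st.1.modify "nulo" 0 (· + 1), st.2 + 1)
      else st)
    (PySem.Dict.empty, 0)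
  (st.1.items, st.2)

-- ===== PORT B =====
-- Literal port of B: _chaves helper, key extraction by comprehension (flatMap),
-- dict comprehension over dict.fromkeys (first-occurrence distinct = PySem.Set.ofList)
-- counting each key with list.count, and len(chaves) as the total.
def pvChaves (voto : List (String × String)) : List String :=
  let v := PySem.Dict.ofList voto
  let tipo := v.get? "tipoVoto"
  if tipo = some "nominal" then [v.getD "digitacao" ""]
  else if tipo = some "branco" ∨ tipo = some "nulo" then [tipo.getD ""]
  else []

def processar_votos_alt (votos : List (String × List (List (String × String)))) : (List (String × Int)) × Int :=
  let chaves := ((PySem.Dict.ofList votos).getD "votos" []).flatMap pvChaves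
  ((PySem.Set.ofList chaves).map (fun c => (c, (chaves.count c : Int))), (chaves.length : Int))

-- ===== PRECONDITION & SPEC =====
-- Pre_ excludes inputs on which A raises (no 'votos' key: iterating None is a TypeError) and
-- inputs on which A's result is not of the declared type (a nominal vote without 'digitacao'
-- puts the non-string key None into the returned dict; B does the same there).
def Pre_processar_votos (votos : List (String × List (List (String × String)))) : Prop :=
  (PySem.Dict.ofList votos).contains "votos" = true ∧
  (((PySem.Dict.ofList votos).getD "votos" []).all
    (fun voto => !((PySem.Dict.ofList voto).get? "tipoVoto" == some "nominal")
                 || (PySem.Dict.ofList voto).contains "digitacao")) = true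
instance (votos : List (String × List (List (String × String)))) : Decidable (Pre_processar_votos votos) := by unfold Pre_processar_votos; infer_instance

def pvWitness_processar_votos : (List (String × List (List (String × String)))) :=
  [("votos", [[("tipoVoto", "nominal"), ("digitacao", "12")],
              [("tipoVoto", "branco")], [("tipoVoto", "nulo")],
              [("tipoVoto", "nominal"), ("digitacao", "12")], [("tipoVoto", "secao")]])]

def Spec_processar_votos (votos : List (String × List (List (String × String)))) (out : (List (String × Int)) × Int) : Prop := out = processar_votos_alt votos
instance (votos : List (String × List (List (String × String)))) (out : (List (String × Int)) × Int) : Decidable (Spec_processar_votos votos out) := by unfold Spec_processar_votos; infer_instance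

-- ===== CLAIM (what is proved, stated in full; the proofs are below) =====
def Claim_equal_processar_votos : Prop := ∀ (votos : List (String × List (List (String × String)))), Dom_processar_votos votos → Pre_processar_votos votos → Spec_processar_votos votos (processar_votos votos)

-- ===== LEMMAS AND PROOFS =====

theorem pvChaves_nominal (voto : List (String × String))
    (h : (PySem.Dict.ofList voto).get? "tipoVoto" = some "nominal") :
    pvChaves voto = [(PySem.Dict.ofList voto).getD "digitacao" ""] := by
  simp [pvChaves, h]

theorem pvChaves_branco (voto : List (String × String))
    (h : (PySem.Dict.ofList voto).get? "tipoVoto" = some "branco") :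
    pvChaves voto = ["branco"] := by
  simp [pvChaves, h]

theorem pvChaves_nulo (voto : List (String × String))
    (h : (PySem.Dict.ofList voto).get? "tipoVoto" = some "nulo") :
    pvChaves voto = ["nulo"] := by
  simp [pvChaves, h]

theorem pvChaves_other (voto : List (String × String))
    (h1 : ¬ (PySem.Dict.ofList voto).get? "tipoVoto" = some "nominal")
    (h2 : ¬ (PySem.Dict.ofList voto).get? "tipoVoto" = some "branco")
    (h3 : ¬ (PySem.Dict.ofList voto).get? "tipoVoto" = some "nulo") :
    pvChaves voto = [] := by
  simp [pvChaves, h1, h2, h3]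

-- A's fold, characterised: its dict is the counter-fold over the flattened key list
-- and its running total is that list's length.
theorem pv_foldA (lst : List (List (String × String))) :
    ∀ (d : PySem.Dict String Int) (n : Int),
    lst.foldl
      (fun (st : PySem.Dict String Int × Int) voto =>
        let v := PySem.Dict.ofList voto
        let tipo := v.get? "tipoVoto"
        if tipo = some "nominal" then
          (st.1.modify (v.getD "digitacao" "") 0 (· + 1), st.2 + 1)
        else if tipo = some "branco" then
          (st.1.modify "branco" 0 (· + 1), st.2 + 1)
        else if tipo = some "nulo" then
          (st.1.modify "nulo" 0 (· + 1), st.2 + 1)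
        else st) (d, n)
    = ((lst.flatMap pvChaves).foldl (fun dd x => dd.modify x 0 (· + 1)) d,
       n + (lst.flatMap pvChaves).length) := by
  induction lst with
  | nil => intro d n; simp
  | cons voto rest ih =>
    intro d n
    simp only [List.foldl_cons, List.flatMap_cons, List.foldl_append, List.length_append]
    by_cases h1 : (PySem.Dict.ofList voto).get? "tipoVoto" = some "nominal"
    · simp [h1, pvChaves_nominal voto h1, ih, add_assoc]
    · by_cases h2 : (PySem.Dict.ofList voto).get? "tipoVoto" = some "branco"
      · simp [h2, pvChaves_branco voto h2, ih, add_assoc]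
      · by_cases h3 : (PySem.Dict.ofList voto).get? "tipoVoto" = some "nulo"
        · simp [h3, pvChaves_nulo voto h3, ih, add_assoc]
        · simp [h1, h2, h3, pvChaves_other voto h1 h2 h3, ih]

-- ===== VERDICT (by name: the statement is the Claim_ definition above) =====
theorem processar_votos_spec : Claim_equal_processar_votos := by
  intro votos _ _
  unfold Spec_processar_votos processar_votos processar_votos_alt
  simp only [pv_foldA]
  rw [← PySem.Dict.counter_eq_foldl, PySem.Dict.items_counter]
  simp
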